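-- pv_equiv track=rewrite | github.com/FutureMaker0/Programmers-Lv.0 | 개미 군단.py | solution
-- ===== SOURCE A (Python) =====
-- def solution(hp):
--     answer = 0
--     ant_power = [5, 3, 1]
--
--     for power in ant_power:
--         if hp >= power:
--             answer += (hp//power)
--             hp -= ((hp//power)*power)
--
--     return answer
-- ===== SOURCE B (Python) =====
-- def solution(hp):
--     # Minimum-ant characterization: the answer is the ceiling of hp/5,
--     # plus one extra ant when the remainder mod 5 is 2 or 4 (those need
--     # a 3-ant AND 1-ants / two extra pieces beyond the ceiling's one slot).
--     if hp < 1: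
--         return 0
--     r = hp % 5
--     return -(-hp // 5) + (1 if r in (2, 4) else 0)
-- ===== Notes on version B (the rewrite author's own statement) =====
-- stated objective: alternative
-- what changed: Replaces the greedy loop over the [5,3,1] power list with a ceiling-division characterization: the answer is ceil(hp/5) plus a +1 correction exactly when hp % 5 is 2 or 4, behind a non-positive guard.
import Mathlib
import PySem

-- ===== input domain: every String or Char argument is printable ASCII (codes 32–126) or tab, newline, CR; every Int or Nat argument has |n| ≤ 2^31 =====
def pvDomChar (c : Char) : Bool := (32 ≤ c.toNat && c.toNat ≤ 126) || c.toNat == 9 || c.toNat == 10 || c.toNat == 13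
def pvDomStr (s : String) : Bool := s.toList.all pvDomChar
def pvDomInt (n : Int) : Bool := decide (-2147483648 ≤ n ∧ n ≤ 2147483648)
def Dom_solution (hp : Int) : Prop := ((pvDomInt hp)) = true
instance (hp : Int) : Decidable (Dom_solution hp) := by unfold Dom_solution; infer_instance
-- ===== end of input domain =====

-- B replaces A's greedy loop with a ceiling-division formula plus a remainder correction (alternative formulation).

-- ===== PORT A =====
def solution (hp : Int) : Int :=
  -- answer = 0; for power in [5,3,1]: if hp >= power: answer += hp//power; hp -= (hp//power)*power
  (([5, 3, 1] : List Int).foldl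
    (fun (st : Int × Int) (power : Int) =>
      if st.2 ≥ power then
        (st.1 + PySem.Int.floordiv st.2 power,
         st.2 - PySem.Int.floordiv st.2 power * power)
      else st)
    (0, hp)).1

-- ===== PORT B =====
def solution_alt (hp : Int) : Int :=
  if hp < 1 then 0
  else
    let r := PySem.Int.mod hp 5;
    -(PySem.Int.floordiv (-hp) 5) + (if r = 2 ∨ r = 4 then 1 else 0)

-- ===== PRECONDITION & SPEC =====
def Spec_solution (hp : Int) (out : Int) : Prop := out = solution_alt hp
instance (hp : Int) (out : Int) : Decidable (Spec_solution hp out) := by unfold Spec_solution; infer_instance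

-- ===== CLAIM (what is proved, stated in full; the proofs are below) =====
def Claim_equal_solution : Prop := ∀ (hp : Int), Dom_solution hp → Spec_solution hp (solution hp)

-- ===== LEMMAS AND PROOFS =====

-- ===== VERDICT (by name: the statement is the Claim_ definition above) =====
theorem solution_spec : Claim_equal_solution := by
  intro hp _
  unfold Spec_solution solution solution_alt
  simp only [List.foldl,
    PySem.Int.floordiv_eq_ediv_of_pos (show (0:Int) < 5 by norm_num),
    PySem.Int.floordiv_eq_ediv_of_pos (show (0:Int) < 3 by norm_num),
    PySem.Int.floordiv_eq_ediv_of_pos (show (0:Int) < 1 by norm_num),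
    PySem.Int.mod_eq_emod_of_pos (show (0:Int) < 5 by norm_num)]
  split_ifs <;> omega
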